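-- pv_equiv track=rewrite | github.com/kingdog2376-hub/playPiano | playPiano.py | tokenize_score_line
-- ===== SOURCE A (Python) =====
-- def tokenize_score_line(line: str) -> list:
--     """Split score line into tokens, keeping brackets [] and braces {} intact."""
--     line = line.split('//', 1)[0].strip()
--     if not line:
--         return []
--     tokens = []
--     buf = []
--     depth = 0
--     for ch in line:
--         if ch in ('[', '{'):
--             depth += 1
--             buf.append(ch)
--         elif ch in (']', '}'):
--             depth = max(0, depth - 1)
--             buf.append(ch)
--         elif ch.isspace() and depth == 0:
--             if buf:
--                 tokens.append(''.join(buf).strip())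
--                 buf = []
--         else:
--             buf.append(ch)
--     if buf:
--         tokens.append(''.join(buf).strip())
--     return tokens
-- ===== SOURCE B (Python) =====
-- def tokenize_score_line(line: str) -> list:
--     """Split score line into tokens, keeping brackets [] and braces {} intact."""
--     line = line.split('//', 1)[0].strip()
--     if not line:
--         return []
--     # pass 1: record the indices of every depth-0 whitespace char
--     cuts = []
--     depth = 0
--     for i, ch in enumerate(line):
--         if ch in '[{':
--             depth += 1
--         elif ch in ']}':
--             depth = max(0, depth - 1)
--         elif ch.isspace() and depth == 0:
--             cuts.append(i)
--     # pass 2: slice the line at those boundaries, keep non-empty stripped pieces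
--     tokens = []
--     prev = 0
--     for c in cuts + [len(line)]:
--         seg = line[prev:c].strip()
--         if seg:
--             tokens.append(seg)
--         prev = c + 1
--     return tokens
-- ===== Notes on version B (the rewrite author's own statement) =====
-- stated objective: alternative
-- what changed: B replaces A's single buffer-accumulating pass by two separate passes: one depth-tracking scan that only records the indices of depth-0 whitespace, then a boundary walk that slices the line at those indices and keeps the non-empty stripped pieces.
import Mathlib
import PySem

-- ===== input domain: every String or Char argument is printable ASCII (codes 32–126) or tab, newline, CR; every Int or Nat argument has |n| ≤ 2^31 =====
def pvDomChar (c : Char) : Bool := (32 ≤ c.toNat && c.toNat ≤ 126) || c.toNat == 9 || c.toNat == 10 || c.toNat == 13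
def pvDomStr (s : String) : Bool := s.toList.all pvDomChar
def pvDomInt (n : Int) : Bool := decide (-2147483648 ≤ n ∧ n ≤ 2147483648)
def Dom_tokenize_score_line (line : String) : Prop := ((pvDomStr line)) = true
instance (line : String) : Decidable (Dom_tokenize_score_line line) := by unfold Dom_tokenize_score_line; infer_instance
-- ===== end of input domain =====

-- B tokenizes in two separate passes (record depth-0 whitespace indices, then slice at them)
-- instead of A's single buffer-accumulating pass; same cost, alternative decomposition.

-- ===== PORT A =====
-- one step of A's for-loop: state = (tokens, buf, depth)
def pvAStep (st : List String × List Char × Int) (ch : Char) : List String × List Char × Int :=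
  if ch = '[' ∨ ch = '{' then (st.1, st.2.1 ++ [ch], st.2.2 + 1)
  else if ch = ']' ∨ ch = '}' then (st.1, st.2.1 ++ [ch], max 0 (st.2.2 - 1))
  else if PySem.Chars.isspace ch ∧ st.2.2 = 0 then
    (if st.2.1 ≠ [] then st.1 ++ [String.ofList (PySem.Chars.strip st.2.1)] else st.1, [], st.2.2)
  else (st.1, st.2.1 ++ [ch], st.2.2)

def tokenize_score_line (line : String) : List String :=
  let cs := PySem.Chars.strip ((PySem.Chars.splitOnMax line.toList "//".toList 1).headD [])
  if cs = [] then []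
  else
    let st := cs.foldl pvAStep ([], [], 0)
    if st.2.1 ≠ [] then st.1 ++ [String.ofList (PySem.Chars.strip st.2.1)] else st.1

-- ===== PORT B =====
-- pass 1 step: state = (cuts, depth), input = (index, char) from enumerate
def pvBCutStep (st : List Int × Int) (p : Int × Char) : List Int × Int :=
  if p.2 = '[' ∨ p.2 = '{' then (st.1, st.2 + 1)
  else if p.2 = ']' ∨ p.2 = '}' then (st.1, max 0 (st.2 - 1))
  else if PySem.Chars.isspace p.2 ∧ st.2 = 0 then (st.1 ++ [p.1], st.2)
  else st

-- pass 2 step: state = (tokens, prev), boundary c; seg = line[prev:c].strip()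
def pvBSliceStep (cs : List Char) (st : List String × Int) (c : Int) : List String × Int :=
  let seg := PySem.Chars.strip (PySem.List.slice cs (some st.2) (some c))
  (if seg ≠ [] then st.1 ++ [String.ofList seg] else st.1, c + 1)

def tokenize_score_line_alt (line : String) : List String :=
  let cs := PySem.Chars.strip ((PySem.Chars.splitOnMax line.toList "//".toList 1).headD [])
  if cs = [] then []
  else
    let cuts := ((PySem.List.enumerate cs 0).foldl pvBCutStep ([], 0)).1
    ((cuts ++ [(cs.length : Int)]).foldl (pvBSliceStep cs) ([], 0)).1

-- ===== PRECONDITION & SPEC =====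
def Spec_tokenize_score_line (line : String) (out : List String) : Prop := out = tokenize_score_line_alt line
instance (line : String) (out : List String) : Decidable (Spec_tokenize_score_line line out) := by unfold Spec_tokenize_score_line; infer_instance

-- ===== CLAIM (what is proved, stated in full; the proofs are below) =====
def Claim_equal_tokenize_score_line : Prop := ∀ (line : String), Dom_tokenize_score_line line → Spec_tokenize_score_line line (tokenize_score_line line)

-- ===== LEMMAS AND PROOFS =====

-- reference tokenizer: what A's loop computes after the given state, tokens not yet accumulated
def refTok (cs : List Char) (buf : List Char) (d : Int) : List String :=
  match cs with
  | [] => if buf ≠ [] then [String.ofList (PySem.Chars.strip buf)] else []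
  | c :: cs =>
    if c = '[' ∨ c = '{' then refTok cs (buf ++ [c]) (d + 1)
    else if c = ']' ∨ c = '}' then refTok cs (buf ++ [c]) (max 0 (d - 1))
    else if PySem.Chars.isspace c ∧ d = 0 then
      if buf ≠ [] then String.ofList (PySem.Chars.strip buf) :: refTok cs [] d
      else refTok cs [] d
    else refTok cs (buf ++ [c]) d

-- B's pass-1 output, recursively
def bCuts (es : List (Int × Char)) (d : Int) : List Int :=
  match es with
  | [] => []
  | p :: es =>
    if p.2 = '[' ∨ p.2 = '{' then bCuts es (d + 1)
    else if p.2 = ']' ∨ p.2 = '}' then bCuts es (max 0 (d - 1))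
    else if PySem.Chars.isspace p.2 ∧ d = 0 then p.1 :: bCuts es d
    else bCuts es d

def flushA (st : List String × List Char × Int) : List String :=
  if st.2.1 ≠ [] then st.1 ++ [String.ofList (PySem.Chars.strip st.2.1)] else st.1

theorem aFold_eq_refTok (cs : List Char) (tokens : List String) (buf : List Char) (d : Int) :
    flushA (cs.foldl pvAStep (tokens, buf, d)) = tokens ++ refTok cs buf d := by
  induction cs generalizing tokens buf d with
  | nil => simp only [List.foldl, refTok, flushA]; split_ifs <;> simp
  | cons c cs ih =>
    simp only [List.foldl, refTok, pvAStep]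
    split_ifs with h1 h2 h3 h4
    · apply ih
    · apply ih
    · rw [ih]; simp
    · apply ih
    · apply ih

theorem cutsFoldl (es : List (Int × Char)) (acc : List Int) (d : Int) :
    (es.foldl pvBCutStep (acc, d)).1 = acc ++ bCuts es d := by
  induction es generalizing acc d with
  | nil => simp [bCuts]
  | cons p es ih =>
    simp only [List.foldl, bCuts, pvBCutStep]
    split_ifs <;> simp [ih]

theorem sliceFoldl (L : List Char) (l : List Int) (acc : List String) (q : Int) :
    (l.foldl (pvBSliceStep L) (acc, q)).1 = acc ++ (l.foldl (pvBSliceStep L) ([], q)).1 := by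
  induction l generalizing acc q with
  | nil => simp
  | cons c l ih =>
    simp only [List.foldl, pvBSliceStep]
    rw [ih]; conv_rhs => rw [ih]
    split_ifs <;> simp

theorem strip_ne_nil (l : List Char) (h : l ≠ [])
    (hh : ∀ c ∈ l.head?, PySem.Chars.isspace c = false) :
    PySem.Chars.strip l ≠ [] := by
  cases l with
  | nil => exact absurd rfl h
  | cons a l =>
    have ha : PySem.Chars.isspace a = false := hh a (by simp)
    simp [PySem.Chars.strip, PySem.Chars.lstrip, PySem.Chars.rstrip, List.dropWhile, ha]
    exact ⟨a, Or.inr rfl, ha⟩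

theorem head_append_single (buf : List Char) (c : Char)
    (hc : PySem.Chars.isspace c = false)
    (hh : ∀ x ∈ buf.head?, PySem.Chars.isspace x = false) :
    ∀ x ∈ (buf ++ [c]).head?, PySem.Chars.isspace x = false := by
  cases buf <;> simp_all

theorem bMain (cs L : List Char) (p q : Nat) (d : Int)
    (hL : L.drop p = cs) (hqp : q ≤ p)
    (hbd : (L.drop q).take (p - q) = [] → d = 0)
    (hh : ∀ c ∈ ((L.drop q).take (p - q)).head?, PySem.Chars.isspace c = false) :
    ((bCuts (PySem.List.enumerate cs (p : Int)) d ++ [(L.length : Int)]).foldl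
      (pvBSliceStep L) ([], (q : Int))).1
    = refTok cs ((L.drop q).take (p - q)) d := by
  induction cs generalizing p q d with
  | nil =>
    have hlen : L.length ≤ p := by
      have := congrArg List.length hL; simp at this; omega
    have h1 : (L.drop q).take (p - q) = L.drop q := by
      apply List.take_of_length_le; simp; omega
    simp only [PySem.List.enumerate_nil, bCuts, List.nil_append, List.foldl,
      pvBSliceStep, PySem.List.slice_natCast, refTok]
    have h2 : (L.drop q).take (L.length - q) = L.drop q := by
      apply List.take_of_length_le; simp
    rw [h1, h2]
    by_cases hq : L.drop q = []
    · simp [hq, PySem.Chars.strip, PySem.Chars.lstrip, PySem.Chars.rstrip]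
    · rw [h1] at hh
      have := strip_ne_nil (L.drop q) hq hh
      simp [hq, this]
  | cons c cs ih =>
    have hlen := congrArg List.length hL
    simp at hlen
    have hp : p < L.length := by omega
    have hdrop : L.drop (p + 1) = cs := by
      have : L.drop (p+1) = (L.drop p).drop 1 := by rw [List.drop_drop]
      rw [this, hL]; rfl
    have hgetp : L[p]? = some c := by
      have h0 : (L.drop p)[0]? = L[p + 0]? := List.getElem?_drop
      rw [hL] at h0; simpa using h0.symm
    have bufSucc : (L.drop q).take (p + 1 - q) = (L.drop q).take (p - q) ++ [c] := by
      have he : p + 1 - q = (p - q) + 1 := by omega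
      rw [he, List.take_add_one]
      have : (L.drop q)[p - q]? = some c := by
        rw [List.getElem?_drop]
        have : q + (p - q) = p := by omega
        rw [this, hgetp]
      rw [this]; rfl
    simp only [PySem.List.enumerate_cons, bCuts, refTok]
    have hcast : (p : Int) + 1 = ((p + 1 : Nat) : Int) := by push_cast; ring
    split_ifs with h1 h2 h3 h4
    · -- open bracket
      have hc : PySem.Chars.isspace c = false := by
        rcases h1 with h | h <;> rw [h] <;> decide
      rw [hcast, ih (p+1) q (d+1) hdrop (by omega)
        (by rw [bufSucc]; simp) (by rw [bufSucc]; exact head_append_single _ _ hc hh),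
        bufSucc]
    · -- close bracket
      have hc : PySem.Chars.isspace c = false := by
        rcases h2 with h | h <;> rw [h] <;> decide
      rw [hcast, ih (p+1) q (max 0 (d-1)) hdrop (by omega)
        (by rw [bufSucc]; simp) (by rw [bufSucc]; exact head_append_single _ _ hc hh),
        bufSucc]
    · -- whitespace at depth 0, buf nonempty: cut and flush
      simp only [List.cons_append, List.foldl]
      rw [sliceFoldl]
      simp only [pvBSliceStep, PySem.List.slice_natCast]
      rw [hcast, ih (p+1) (p+1) d hdrop (le_refl _) (by intro _; exact h3.2) (by simp)]
      have hz : (L.drop (p+1)).take (p + 1 - (p + 1)) = [] := by simp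
      rw [hz]
      have := strip_ne_nil _ h4 hh
      simp [this]
    · -- whitespace at depth 0, buf empty: nothing to flush
      have hb : (L.drop q).take (p - q) = [] := by rwa [not_ne_iff] at h4
      simp only [List.cons_append, List.foldl]
      rw [sliceFoldl]
      simp only [pvBSliceStep, PySem.List.slice_natCast]
      rw [hcast, ih (p+1) (p+1) d hdrop (le_refl _) (by intro _; exact h3.2) (by simp)]
      have hz : (L.drop (p+1)).take (p + 1 - (p + 1)) = [] := by simp
      rw [hz, hb]
      simp [PySem.Chars.strip, PySem.Chars.lstrip, PySem.Chars.rstrip]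
    · -- ordinary char (or whitespace at depth > 0)
      have hc : ∀ x ∈ ((L.drop q).take (p - q) ++ [c]).head?, PySem.Chars.isspace x = false := by
        by_cases hb : (L.drop q).take (p - q) = []
        · have hd0 : d = 0 := hbd hb
          have : PySem.Chars.isspace c = false := by
            by_contra hcc
            exact h3 ⟨by simpa using hcc, hd0⟩
          rw [hb]; simpa using this
        · cases hbuf : (L.drop q).take (p - q) with
          | nil => exact absurd hbuf hb
          | cons b bs =>
            rw [hbuf] at hh; simpa using hh
      rw [hcast, ih (p+1) q d hdrop (by omega) (by rw [bufSucc]; simp) (by rw [bufSucc]; exact hc),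
        bufSucc]

-- ===== VERDICT (by name: the statement is the Claim_ definition above) =====
theorem tokenize_score_line_spec : Claim_equal_tokenize_score_line := by
  intro line _
  unfold Spec_tokenize_score_line tokenize_score_line tokenize_score_line_alt
  set cs := PySem.Chars.strip ((PySem.Chars.splitOnMax line.toList "//".toList 1).headD []) with hcs
  by_cases h : cs = []
  · simp [h]
  · simp only [if_neg h]
    have hA := aFold_eq_refTok cs [] [] 0
    simp only [flushA, List.nil_append] at hA
    rw [hA, cutsFoldl]
    simp only [List.nil_append]
    have hB := bMain cs cs 0 0 0 (by simp) (le_refl 0) (by simp) (by simp)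
    simp only [Nat.cast_zero, List.drop_zero, Nat.sub_self, List.take_zero] at hB
    rw [hB]
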